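-- pv_equiv track=rewrite | github.com/CocoRoF/Contextify | libs/core/processor/pdf_handler.py | _extract_last_category
-- ===== SOURCE A (Python) =====
-- from typing import Any, Dict, List, Optional, Tuple
--
-- def _extract_last_category(table_data: List[List[Optional[str]]]) -> Optional[str]:
--     """
--     테이블 데이터에서 마지막 유효한 카테고리(첫 번째 열) 값을 추출합니다.
--
--     Args:
--         table_data: 테이블 데이터
--
--     Returns:
--         마지막 유효한 첫 번째 열 값 또는 None
--     """
--     if not table_data:
--         return None
--
--     for row in reversed(table_data):
--         if row and len(row) >= 1:
--             first_col = row[0]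
--             if first_col and str(first_col).strip():
--                 return first_col
--
--     return None
-- ===== SOURCE B (Python) =====
-- from typing import List, Optional
--
-- def _extract_last_category(table_data: List[List[Optional[str]]]) -> Optional[str]:
--     result = None
--     for row in table_data:
--         if row and len(row) >= 1:
--             first_col = row[0]
--             if first_col and str(first_col).strip():
--                 result = first_col
--     return result
-- ===== Notes on version B (the rewrite author's own statement) =====
-- stated objective: simpler
-- what changed: Replaces the reversed() scan with early return by a single forward pass that keeps the latest valid first-column value in an accumulator, dropping the reversal and the empty-list guard.
import Mathlib
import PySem

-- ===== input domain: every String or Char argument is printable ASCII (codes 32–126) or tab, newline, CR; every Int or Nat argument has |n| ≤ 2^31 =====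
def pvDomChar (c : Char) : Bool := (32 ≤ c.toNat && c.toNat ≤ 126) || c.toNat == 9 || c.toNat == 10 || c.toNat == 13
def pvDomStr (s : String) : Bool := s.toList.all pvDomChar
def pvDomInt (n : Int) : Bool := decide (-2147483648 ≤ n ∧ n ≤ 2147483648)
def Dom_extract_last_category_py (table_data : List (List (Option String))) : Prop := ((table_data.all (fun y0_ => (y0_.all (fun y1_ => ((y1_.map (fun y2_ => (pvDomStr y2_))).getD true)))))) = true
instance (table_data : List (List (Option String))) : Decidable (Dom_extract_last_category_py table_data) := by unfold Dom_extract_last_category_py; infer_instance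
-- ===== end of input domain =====

-- B replaces the reverse scan with an early return by a single forward pass keeping the last valid first-column value (simpler decomposition).


-- ===== PORT A =====
def pvPickA (row : List (Option String)) : Option String :=
  if row ≠ [] ∧ row.length ≥ 1 then
    match row.head? with
    | some first_col =>
      match first_col with
      | some s => if s ≠ "" then (if PySem.Str.strip s ≠ "" then some s else none) else none
      | none => none
    | none => none
  else none

def pvGoA : List (List (Option String)) → Option String
  | [] => none
  | row :: rest =>
    match pvPickA row with
    | some s => some s
    | none => pvGoA rest

def extract_last_category_py (table_data : List (List (Option String))) : Option String :=
  if table_data = [] then none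
  else pvGoA table_data.reverse


-- ===== PORT B =====
def pvStepB (result : Option String) (row : List (Option String)) : Option String :=
  match row with
  | [] => result
  | first_col :: _ =>
    match first_col with
    | some s => if s ≠ "" ∧ PySem.Str.strip s ≠ "" then some s else result
    | none => result

def extract_last_category_py_alt (table_data : List (List (Option String))) : Option String :=
  table_data.foldl pvStepB none


-- ===== PRECONDITION & SPEC =====
def Spec_extract_last_category_py (table_data : List (List (Option String))) (out : Option String) : Prop := out = extract_last_category_py_alt table_data
instance (table_data : List (List (Option String))) (out : Option String) : Decidable (Spec_extract_last_category_py table_data out) := by unfold Spec_extract_last_category_py; infer_instance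

-- ===== CLAIM (what is proved, stated in full; the proofs are below) =====
def Claim_equal_extract_last_category_py : Prop := ∀ (table_data : List (List (Option String))), Dom_extract_last_category_py table_data → Spec_extract_last_category_py table_data (extract_last_category_py table_data)

-- ===== LEMMAS AND PROOFS =====
theorem pvStepB_eq_pickA (acc : Option String) (row : List (Option String)) :
    pvStepB acc row = match pvPickA row with | some s => some s | none => acc := by
  cases row with
  | nil => simp [pvStepB, pvPickA]
  | cons fc rest =>
    cases fc with
    | none => simp [pvStepB, pvPickA]
    | some s =>
      simp only [pvStepB, pvPickA]
      by_cases h1 : s = "" <;> by_cases h2 : PySem.Str.strip s = "" <;>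
        simp [h1, h2]

theorem pvGoA_append (xs ys : List (List (Option String))) :
    pvGoA (xs ++ ys) = match pvGoA xs with | some s => some s | none => pvGoA ys := by
  induction xs with
  | nil => simp [pvGoA]
  | cons r rs ih =>
    simp only [List.cons_append, pvGoA, ih]
    cases pvPickA r <;> simp

theorem foldl_eq_goA (l : List (List (Option String))) (acc : Option String) :
    l.foldl pvStepB acc = match pvGoA l.reverse with | some s => some s | none => acc := by
  induction l generalizing acc with
  | nil => simp [pvGoA]
  | cons r rs ih =>
    simp only [List.foldl_cons, ih, List.reverse_cons, pvGoA_append, pvGoA,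
      pvStepB_eq_pickA]
    cases pvGoA rs.reverse <;> cases pvPickA r <;> simp


-- ===== VERDICT (by name: the statement is the Claim_ definition above) =====
theorem extract_last_category_py_spec : Claim_equal_extract_last_category_py := by
  intro table_data _
  unfold Spec_extract_last_category_py extract_last_category_py extract_last_category_py_alt
  rw [foldl_eq_goA]
  cases table_data with
  | nil => simp [pvGoA]
  | cons r rs =>
    simp only [if_neg (List.cons_ne_nil r rs)]
    cases pvGoA (r :: rs).reverse <;> simp
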